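-- pv_equiv track=rewrite | github.com/whitebalsamic/invoice-router | src/invoice_router/infrastructure/persistence/postgres.py | translate_query
-- ===== SOURCE A (Python) =====
-- def translate_query(sql: str) -> str:
--     parts = sql.split("?")
--     if len(parts) == 1:
--         return sql
--     translated = [parts[0]]
--     for index, part in enumerate(parts[1:], start=1):
--         translated.append(f"${index}")
--         translated.append(part)
--     return "".join(translated)
-- ===== SOURCE B (Python) =====
-- def translate_query(sql: str) -> str:
--     out = []
--     n = 1
--     for ch in sql:
--         if ch == "?":
--             out.append(f"${n}")
--             n += 1
--         else:
--             out.append(ch)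
--     return "".join(out)
-- ===== Notes on version B (the rewrite author's own statement) =====
-- stated objective: simpler
-- what changed: Replaces split-on-'?'/enumerate/interleave-join with a single forward pass over the characters keeping an integer counter, emitting $n in place of each '?'.
import Mathlib
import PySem

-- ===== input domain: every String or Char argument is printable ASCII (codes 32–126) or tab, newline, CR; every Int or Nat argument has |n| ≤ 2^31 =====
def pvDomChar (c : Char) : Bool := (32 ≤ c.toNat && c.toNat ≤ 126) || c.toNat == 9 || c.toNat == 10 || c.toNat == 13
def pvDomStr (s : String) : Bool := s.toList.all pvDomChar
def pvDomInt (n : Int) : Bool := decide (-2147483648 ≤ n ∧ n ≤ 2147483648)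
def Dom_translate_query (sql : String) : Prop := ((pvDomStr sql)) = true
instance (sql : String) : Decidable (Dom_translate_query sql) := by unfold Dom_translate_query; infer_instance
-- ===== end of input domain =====

-- B replaces A's split-on-'?' / enumerate / interleave-join by a single per-character pass with a counter (objective: simpler).

-- ===== PORT A =====
def translate_query (sql : String) : String :=
  let parts := PySem.Chars.splitOn sql.toList ['?']
  if parts.length = 1 then sql
  else
    let translated :=
      (PySem.List.enumerate (parts.drop 1) 1).foldl
        (fun acc ip => acc ++ ['$' :: PySem.Int.toChars ip.1, ip.2]) [parts.headD []]
    String.ofList (PySem.Chars.join [] translated)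

-- ===== PORT B =====
-- the per-character loop of Source B: structural recursion over the characters, counter threaded through
def translateGo : List Char → Int → List Char
  | [], _ => []
  | c :: rest, n =>
    if c = '?' then '$' :: (PySem.Int.toChars n ++ translateGo rest (n + 1))
    else c :: translateGo rest n

def translate_query_alt (sql : String) : String :=
  String.ofList (translateGo sql.toList 1)

-- ===== PRECONDITION & SPEC =====
def Spec_translate_query (sql : String) (out : String) : Prop := out = translate_query_alt sql
instance (sql : String) (out : String) : Decidable (Spec_translate_query sql out) := by unfold Spec_translate_query; infer_instance

-- ===== CLAIM (what is proved, stated in full; the proofs are below) =====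
def Claim_equal_translate_query : Prop := ∀ (sql : String), Dom_translate_query sql → Spec_translate_query sql (translate_query sql)

-- ===== LEMMAS AND PROOFS =====

-- A reference form of split-on-'?' used only by the proofs
def simpleSplit : List Char → List (List Char)
  | [] => [[]]
  | c :: rest =>
    if c = '?' then [] :: simpleSplit rest
    else
      match simpleSplit rest with
      | [] => [[c]]      -- unreachable: simpleSplit never returns []
      | h :: t => (c :: h) :: t

theorem simpleSplit_ne_nil (cs : List Char) : simpleSplit cs ≠ [] := by
  cases cs with
  | nil => simp [simpleSplit]
  | cons c rest =>
    simp only [simpleSplit]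
    split
    · simp
    · split <;> simp

theorem splitOn_go_eq (fuel : Nat) (l cur : List Char) (acc : List (List Char))
    (h : l.length < fuel) :
    PySem.Chars.splitOn.go ['?'] fuel l cur acc
      = acc.reverse ++ (simpleSplit l).modifyHead (cur.reverse ++ ·) := by
  induction fuel generalizing l cur acc with
  | zero => omega
  | succ fuel ih =>
    cases l with
    | nil =>
      simp [PySem.Chars.splitOn.go, simpleSplit]
    | cons c rest =>
      by_cases hc : c = '?'
      · subst hc
        have hpre : List.isPrefixOf ['?'] ('?' :: rest) = true := by
          simp [List.isPrefixOf]
        rw [PySem.Chars.splitOn.go]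
        simp only [hpre, if_true, List.length_cons, List.drop_succ_cons,
          List.length_nil, List.drop_zero]
        rw [ih rest [] (cur.reverse :: acc) (by simpa using Nat.lt_of_succ_lt_succ h)]
        simp [simpleSplit, List.modifyHead]
        cases hr : simpleSplit rest with
        | nil => exact absurd hr (simpleSplit_ne_nil rest)
        | cons h t => simp
      · have hpre : List.isPrefixOf ['?'] (c :: rest) = false := by
          simp [List.isPrefixOf]
          intro hcq; exact hc hcq.symm
        rw [PySem.Chars.splitOn.go]
        simp only [hpre, Bool.false_eq_true, if_false]
        rw [ih rest (c :: cur) acc (by simpa using Nat.lt_of_succ_lt_succ h)]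
        simp only [simpleSplit, hc, if_false]
        cases hr : simpleSplit rest with
        | nil => exact absurd hr (simpleSplit_ne_nil rest)
        | cons h t => simp

theorem splitOn_eq_simpleSplit (cs : List Char) :
    PySem.Chars.splitOn cs ['?'] = simpleSplit cs := by
  have := splitOn_go_eq (cs.length + 1) cs [] [] (by omega)
  simp only [PySem.Chars.splitOn] at *
  rw [this]
  cases h : simpleSplit cs with
  | nil => exact absurd h (simpleSplit_ne_nil cs)
  | cons a t => simp

theorem join_empty_sep (ps : List (List Char)) : PySem.Chars.join [] ps = ps.flatten := by
  induction ps with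
  | nil => rfl
  | cons p ps ih =>
    cases ps with
    | nil => simp [PySem.Chars.join, List.intercalate]
    | cons q qs =>
      simp [PySem.Chars.join, List.intercalate, List.intersperse] at *
      simpa using ih

-- main correspondence: A's interleaved parts, flattened, equal B's single pass
theorem main_lemma (cs : List Char) (n : Int) :
    (simpleSplit cs).headD []
      ++ (PySem.List.enumerate ((simpleSplit cs).drop 1) n).flatMap
           (fun ip => ('$' :: PySem.Int.toChars ip.1) ++ ip.2)
      = translateGo cs n := by
  induction cs generalizing n with
  | nil => simp [simpleSplit, translateGo]
  | cons c rest ih =>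
    by_cases hc : c = '?'
    · subst hc
      simp only [simpleSplit, if_true]
      cases hr : simpleSplit rest with
      | nil => exact absurd hr (simpleSplit_ne_nil rest)
      | cons h t =>
        have := ih (n + 1)
        rw [hr] at this
        simp only [List.headD_cons, List.drop_one, List.tail_cons] at this
        simp only [List.headD_cons, List.drop_one, List.tail_cons,
          PySem.List.enumerate_cons, List.flatMap_cons, translateGo, if_true, List.nil_append]
        rw [← this]
        simp
    · simp only [simpleSplit, hc, if_false]
      cases hr : simpleSplit rest with
      | nil => exact absurd hr (simpleSplit_ne_nil rest)
      | cons h t =>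
        have := ih n
        rw [hr] at this
        simp only [List.headD_cons, List.drop_one, List.tail_cons] at this
        simp only [List.headD_cons, List.drop_one, List.tail_cons, translateGo, hc, if_false]
        rw [← this]
        simp

theorem simpleSplit_singleton (cs : List Char) (h : (simpleSplit cs).length = 1) :
    simpleSplit cs = [cs] := by
  induction cs with
  | nil => rfl
  | cons c rest ih =>
    by_cases hc : c = '?'
    · subst hc
      simp only [simpleSplit, if_true, List.length_cons] at h
      exact absurd (List.length_eq_zero_iff.mp (by omega)) (simpleSplit_ne_nil rest)
    · simp only [simpleSplit, hc, if_false] at h ⊢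
      cases hr : simpleSplit rest with
      | nil => exact absurd hr (simpleSplit_ne_nil rest)
      | cons p t =>
        rw [hr] at h
        simp only [List.length_cons] at h
        have ht : t = [] := List.length_eq_zero_iff.mp (by omega)
        subst ht
        have : simpleSplit rest = [rest] := by
          have := ih (by rw [hr]; rfl)
          exact this
        rw [hr] at this
        simp at this
        simp [this]

theorem flatten_pairs (l : List (Int × List Char)) :
    (l.flatMap (fun ip => ['$' :: PySem.Int.toChars ip.1, ip.2])).flatten
      = l.flatMap (fun ip => '$' :: (PySem.Int.toChars ip.1 ++ ip.2)) := by
  induction l with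
  | nil => rfl
  | cons p t ih => simp [ih]

-- ===== VERDICT (by name: the statement is the Claim_ definition above) =====
theorem translate_query_spec : Claim_equal_translate_query := by
  intro sql _
  unfold Spec_translate_query translate_query translate_query_alt
  rw [splitOn_eq_simpleSplit]
  by_cases h1 : (simpleSplit sql.toList).length = 1
  · simp only [h1, if_true]
    have hs := simpleSplit_singleton sql.toList h1
    have := main_lemma sql.toList 1
    rw [hs] at this
    simp only [List.headD_cons, List.drop_one, List.tail_cons,
      PySem.List.enumerate_nil, List.flatMap_nil, List.append_nil] at this
    rw [← this, String.ofList_toList]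
  · simp only [h1, if_false]
    congr 1
    rw [PySem.List.foldl_append_eq_flatMap
      (fun ip : Int × List Char => ['$' :: PySem.Int.toChars ip.1, ip.2])]
    rw [join_empty_sep]
    rw [← main_lemma sql.toList 1]
    simp [flatten_pairs]
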